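-- pv_equiv track=rewrite | github.com/russellmiller49/proc_suite_deploy | app/registry/deterministic_extractors.py | _is_non_procedural_heading
-- ===== SOURCE A (Python) =====
-- _NON_PROCEDURAL_HEADINGS: tuple[str, ...] = (
--     "PLAN",
--     "IMPRESSION/PLAN",
--     "IMPRESSION / PLAN",
--     "ASSESSMENT/PLAN",
--     "ASSESSMENT / PLAN",
--     "RECOMMENDATION",
--     "RECOMMENDATIONS",
--     "ASSESSMENT",
-- )
--
-- def _is_non_procedural_heading(header: str) -> bool:
--     if header in _NON_PROCEDURAL_HEADINGS:
--         return True
--     return any(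
--         header.startswith(prefix)
--         for token in _NON_PROCEDURAL_HEADINGS
--         for prefix in (f"{token} ", f"{token}/", f"{token} -")
--     )
-- ===== SOURCE B (Python) =====
-- _NON_PROCEDURAL_HEADINGS: tuple[str, ...] = (
--     "PLAN",
--     "IMPRESSION/PLAN",
--     "IMPRESSION / PLAN",
--     "ASSESSMENT/PLAN",
--     "ASSESSMENT / PLAN",
--     "RECOMMENDATION",
--     "RECOMMENDATIONS",
--     "ASSESSMENT",
-- )
--
-- _NP_SET: frozenset = frozenset(_NON_PROCEDURAL_HEADINGS)
-- _NP_MAXLEN: int = max(len(t) for t in _NON_PROCEDURAL_HEADINGS)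
--
-- def _is_non_procedural_heading(header: str) -> bool:
--     # Invert the loop: instead of scanning the heading list per call, scan the
--     # header's delimiter positions (space/slash, only up to the longest heading)
--     # and look the preceding prefix up in a precomputed hash set; the whole
--     # header (exact match) is covered by the truncated-slice lookup, which can
--     # only succeed when the slice is the entire header.
--     if header[:_NP_MAXLEN + 1] in _NP_SET:
--         return True
--     return any(
--         header[:i] in _NP_SET
--         for i in range(min(len(header), _NP_MAXLEN + 1))
--         if header[i] in " /"
--     )
-- ===== Notes on version B (the rewrite author's own statement) =====
-- stated objective: alternative
-- what changed: Inverted the traversal: instead of scanning the heading tuple per call (membership plus three generated startswith prefixes per token), B precomputes a frozenset and the maximum heading length, handles exact matches by one truncated-slice set lookup, and scans the header's space/slash delimiter positions (bounded by the longest heading), looking each preceding prefix up in the set.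
import Mathlib
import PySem

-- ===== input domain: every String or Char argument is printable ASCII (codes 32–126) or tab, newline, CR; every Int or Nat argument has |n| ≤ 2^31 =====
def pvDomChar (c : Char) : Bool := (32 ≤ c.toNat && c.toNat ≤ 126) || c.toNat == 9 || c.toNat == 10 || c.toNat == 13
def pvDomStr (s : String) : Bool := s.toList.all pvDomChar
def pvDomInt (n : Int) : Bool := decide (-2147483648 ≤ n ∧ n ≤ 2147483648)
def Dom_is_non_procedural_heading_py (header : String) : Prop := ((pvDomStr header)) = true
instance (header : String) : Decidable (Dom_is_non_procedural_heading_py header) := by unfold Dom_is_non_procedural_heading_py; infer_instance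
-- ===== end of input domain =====

-- B inverts A's traversal: instead of scanning the heading tuple per call (membership plus
-- three generated prefixes per token), B scans the header's delimiter positions up to the
-- longest heading and looks each preceding prefix up in a precomputed hash set (alternative).


-- ===== PORT A =====
-- module constant _NON_PROCEDURAL_HEADINGS (shared by Source A and Source B)
def npHeadings : List String :=
  ["PLAN", "IMPRESSION/PLAN", "IMPRESSION / PLAN", "ASSESSMENT/PLAN",
   "ASSESSMENT / PLAN", "RECOMMENDATION", "RECOMMENDATIONS", "ASSESSMENT"]

def is_non_procedural_heading_py (header : String) : Bool :=
  if npHeadings.contains header then true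
  else
    npHeadings.any (fun token =>
      [token ++ " ", token ++ "/", token ++ " -"].any (fun pre =>
        PySem.Str.startswith header pre))

-- ===== PORT B =====
-- _NP_SET = frozenset(_NON_PROCEDURAL_HEADINGS)
def npSet : PySem.Set String := PySem.Set.ofList npHeadings
-- _NP_MAXLEN = max(len(t) for t in _NON_PROCEDURAL_HEADINGS)  (list is nonempty, max? is some)
def npMaxLen : Int :=
  match PySem.List.max? (npHeadings.map (fun t => PySem.Str.len t)) (fun x => x) with
  | some m => m
  | none => 0

-- Source B: truncated-slice set lookup, then any over the delimiter positions of header;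
-- 'header[i] in " /"' on the single character header[i] is ported as c == ' ' || c == '/' (exact).
def is_non_procedural_heading_py_alt (header : String) : Bool :=
  if PySem.Set.contains npSet (PySem.Str.slice header none (some (npMaxLen + 1))) then true
  else
    (PySem.List.pyRange 0 (min (PySem.Str.len header) (npMaxLen + 1)) 1).any (fun i =>
      (match PySem.Str.pyGet? header i with
       | some c => c == ' ' || c == '/'
       | none => false)
      && PySem.Set.contains npSet (PySem.Str.slice header none (some i)))

-- ===== PRECONDITION & SPEC =====
def Spec_is_non_procedural_heading_py (header : String) (out : Bool) : Prop := out = is_non_procedural_heading_py_alt header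
instance (header : String) (out : Bool) : Decidable (Spec_is_non_procedural_heading_py header out) := by unfold Spec_is_non_procedural_heading_py; infer_instance

-- ===== CLAIM (what is proved, stated in full; the proofs are below) =====
def Claim_equal_is_non_procedural_heading_py : Prop := ∀ (header : String), Dom_is_non_procedural_heading_py header → Spec_is_non_procedural_heading_py header (is_non_procedural_heading_py header)

-- ===== LEMMAS AND PROOFS =====

-- the common characterisation both programs are proved equal to:
-- some heading is a prefix of header followed by end-of-string, a space or a slash
def npMatches (header : String) : Prop :=
  ∃ t ∈ npHeadings, t.toList <+: header.toList ∧
    (header.toList.length = t.toList.length ∨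
      header.toList[t.toList.length]? = some ' ' ∨
      header.toList[t.toList.length]? = some '/')

theorem npMaxLen_eq : npMaxLen = 17 := by decide

theorem npHeadings_short : ∀ t ∈ npHeadings, t.toList.length ≤ 17 := by decide

-- appending one character to a prefix: (p ++ [c]) <+: h ↔ p <+: h and h[p.length] = c
theorem np_snoc_prefix_iff (p h : List Char) (c : Char) :
    (p ++ [c]) <+: h ↔ p <+: h ∧ h[p.length]? = some c := by
  constructor
  · rintro ⟨s, rfl⟩
    refine ⟨⟨[c] ++ s, by simp⟩, by simp⟩
  · rintro ⟨⟨r, rfl⟩, hc⟩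
    simp [List.getElem?_append_right] at hc
    match r, hc with
    | c' :: r', hc => simp_all

-- per-token equivalence of A's four tests with the characterisation's body
theorem np_tok_iff (h t : String) :
    (h = t ∨ PySem.Str.startswith h (t ++ " ") = true ∨
       PySem.Str.startswith h (t ++ "/") = true ∨
       PySem.Str.startswith h (t ++ " -") = true) ↔
    (t.toList <+: h.toList ∧
      (h.toList.length = t.toList.length ∨
        h.toList[t.toList.length]? = some ' ' ∨
        h.toList[t.toList.length]? = some '/')) := by
  have hsp : (t ++ " ").toList = t.toList ++ [' '] := by simp
  have hsl : (t ++ "/").toList = t.toList ++ ['/'] := by simp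
  have hsd : (t ++ " -").toList = (t.toList ++ [' ']) ++ ['-'] := by simp
  simp only [PySem.Str.startswith_eq, PySem.Chars.startswith_iff, hsp, hsl, hsd,
    np_snoc_prefix_iff, List.length_append, List.length_singleton]
  constructor
  · rintro (rfl | ⟨hp, hc⟩ | ⟨hp, hc⟩ | ⟨⟨hp, hc⟩, _⟩)
    · exact ⟨List.prefix_refl _, Or.inl rfl⟩
    · exact ⟨hp, Or.inr (Or.inl hc)⟩
    · exact ⟨hp, Or.inr (Or.inr hc)⟩
    · exact ⟨hp, Or.inr (Or.inl hc)⟩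
  · rintro ⟨hp, heq | hc | hc⟩
    · refine Or.inl (String.toList_inj.mp (List.IsPrefix.eq_of_length hp (by omega)).symm)
    · exact Or.inr (Or.inl ⟨hp, hc⟩)
    · exact Or.inr (Or.inr (Or.inl ⟨hp, hc⟩))

-- A computes the characterisation
theorem npA_iff (header : String) :
    is_non_procedural_heading_py header = true ↔ npMatches header := by
  unfold is_non_procedural_heading_py npMatches
  by_cases hc : npHeadings.contains header = true
  · simp only [hc, if_true, true_iff]
    exact ⟨header, List.contains_iff_mem.mp hc, (np_tok_iff header header).mp (Or.inl rfl)⟩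
  · rw [if_neg hc]
    simp only [List.any_eq_true]
    constructor
    · rintro ⟨t, ht, hpre⟩
      refine ⟨t, ht, (np_tok_iff header t).mp ?_⟩
      rcases hpre with ⟨p, hp, hs⟩
      simp only [List.mem_cons, List.not_mem_nil, or_false] at hp
      rcases hp with rfl | rfl | rfl
      · exact Or.inr (Or.inl hs)
      · exact Or.inr (Or.inr (Or.inl hs))
      · exact Or.inr (Or.inr (Or.inr hs))
    · rintro ⟨t, ht, hok⟩
      rcases (np_tok_iff header t).mpr hok with rfl | h1 | h2 | h3
      · exact absurd (List.contains_iff_mem.mpr ht) hc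
      · exact ⟨t, ht, t ++ " ", by simp, h1⟩
      · exact ⟨t, ht, t ++ "/", by simp, h2⟩
      · exact ⟨t, ht, t ++ " -", by simp, h3⟩

-- the slice header[:i] (0 ≤ i) as a string, compared with a heading
theorem np_slice_mem_iff (header : String) (n : Nat) :
    PySem.Str.slice header none (some (n : Int)) ∈ npHeadings ↔
      ∃ t ∈ npHeadings, t.toList = header.toList.take n := by
  constructor
  · intro h
    refine ⟨_, h, ?_⟩
    simp [PySem.List.slice_to_natCast]
  · rintro ⟨t, ht, hteq⟩
    have : PySem.Str.slice header none (some (n : Int)) = t := by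
      apply String.toList_inj.mp
      simp [PySem.List.slice_to_natCast, hteq]
    rw [this]; exact ht

-- the truncated-slice lookup is exactly whole-header membership
theorem np_exact_iff (header : String) :
    PySem.Str.slice header none (some 18) ∈ npHeadings ↔ header ∈ npHeadings := by
  have h18 : ((18 : Nat) : Int) = (18 : Int) := by norm_num
  rw [← h18, np_slice_mem_iff]
  constructor
  · rintro ⟨t, ht, hteq⟩
    have hlen := npHeadings_short t ht
    have hlen18 : t.toList.length = min 18 header.toList.length := by
      rw [hteq, List.length_take]
    have : header.toList.take 18 = header.toList := List.take_of_length_le (by omega)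
    rw [this] at hteq
    have heq : t = header := String.toList_inj.mp hteq
    rwa [heq] at ht
  · intro h
    refine ⟨header, h, ?_⟩
    have := npHeadings_short header h
    exact (List.take_of_length_le (by omega)).symm

-- B computes the characterisation
theorem npB_iff (header : String) :
    is_non_procedural_heading_py_alt header = true ↔ npMatches header := by
  have hnodup : npHeadings.Nodup := by decide
  have hset : npSet = npHeadings := PySem.Set.ofList_eq_self_of_nodup npHeadings hnodup
  have hlenEq : PySem.Str.len header = (header.toList.length : Int) := by simp
  unfold is_non_procedural_heading_py_alt
  rw [npMaxLen_eq, hset]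
  have h18 : (17 : Int) + 1 = 18 := by norm_num
  rw [h18]
  by_cases hc : header ∈ npHeadings
  · simp only [(PySem.Set.contains_iff _ _).mpr ((np_exact_iff header).mpr hc), if_true, true_iff]
    exact ⟨header, hc, List.prefix_refl _, Or.inl rfl⟩
  · have hcf : PySem.Set.contains npHeadings (PySem.Str.slice header none (some 18)) = false := by
      by_contra h
      exact hc ((np_exact_iff header).mp ((PySem.Set.contains_iff _ _).mp (by simpa using h)))
    rw [hcf]
    simp only [Bool.false_eq_true, if_false, List.any_eq_true, PySem.List.mem_pyRange_one,
      Bool.and_eq_true]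
    constructor
    · rintro ⟨i, ⟨hi0, hilt⟩, hfollow, hmem⟩
      rw [hlenEq] at hilt
      have hn : i = ((i.toNat : Nat) : Int) := by omega
      rw [hn] at hmem
      rcases (np_slice_mem_iff header i.toNat).mp
          ((PySem.Set.contains_iff _ _).mp hmem) with ⟨t, ht, hteq⟩
      have hget : PySem.Str.pyGet? header i = header.toList[i.toNat]? := by
        have h1 : PySem.Str.pyGet? header i = PySem.List.pyGet? header.toList i := by simp
        rw [h1, PySem.List.pyGet?_of_nonneg header.toList hi0]
      rw [hget] at hfollow
      have hltlen : i.toNat < header.toList.length := by omega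
      rcases hgot : header.toList[i.toNat]? with _ | c
      · rw [hgot] at hfollow; simp at hfollow
      · rw [hgot] at hfollow
        simp only [Bool.or_eq_true, beq_iff_eq] at hfollow
        have htlen : t.toList.length = i.toNat := by
          rw [hteq, List.length_take]; omega
        refine ⟨t, ht, ?_, ?_⟩
        · rw [hteq]; exact List.take_prefix _ _
        · rw [htlen, hgot]
          rcases hfollow with rfl | rfl
          · exact Or.inr (Or.inl rfl)
          · exact Or.inr (Or.inr rfl)
    · rintro ⟨t, ht, hpre, hfollow⟩
      rcases hfollow with heq | hc' | hc'
      · exact (hc ((String.toList_inj.mp (List.IsPrefix.eq_of_length hpre heq.symm)) ▸ ht)).elim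
      all_goals {
        have hlt : t.toList.length < header.toList.length :=
          (List.getElem?_eq_some_iff.mp hc').1
        have hs := npHeadings_short t ht
        refine ⟨(t.toList.length : Int), ⟨Int.natCast_nonneg _, ?_⟩, ?_, ?_⟩
        · rw [hlenEq]; omega
        · have hget : PySem.Str.pyGet? header ((t.toList.length : Nat) : Int)
              = header.toList[t.toList.length]? := by simp
          rw [hget, hc']
          simp
        · apply (PySem.Set.contains_iff _ _).mpr
          exact (np_slice_mem_iff header t.toList.length).mpr
            ⟨t, ht, List.prefix_iff_eq_take.mp hpre⟩
      }

-- ===== VERDICT (by name: the statement is the Claim_ definition above) =====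
theorem is_non_procedural_heading_py_spec : Claim_equal_is_non_procedural_heading_py := by
  intro header _
  show is_non_procedural_heading_py header = is_non_procedural_heading_py_alt header
  rw [Bool.eq_iff_iff, npA_iff, npB_iff]
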